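-- pv_equiv track=rewrite | github.com/josehu07/summerset | scripts/mirror_repo.py | path_get_last_segment
-- ===== SOURCE A (Python) =====
-- def path_get_last_segment(path):
--     if "/" not in path:
--         return None
--     eidx = len(path) - 1
--     while eidx > 0 and path[eidx] == "/":
--         eidx -= 1
--     bidx = path[:eidx].rfind("/")
--     bidx += 1
--     return path[bidx : eidx + 1]
-- ===== SOURCE B (Python) =====
-- def path_get_last_segment(path):
--     if "/" not in path:
--         return None
--     stripped = path.rstrip("/")
--     if stripped == "":
--         return "/"
--     return stripped.rsplit("/", 1)[-1]
-- ===== Notes on version B (the rewrite author's own statement) =====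
-- stated objective: idiomatic
-- what changed: Replaces A's explicit index-decrementing trailing-slash scan loop plus rfind/slice index arithmetic with built-in string operations: strip the trailing slash run, then take the last rsplit piece, returning the root segment on all-slash paths exactly as A does.
import Mathlib
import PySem

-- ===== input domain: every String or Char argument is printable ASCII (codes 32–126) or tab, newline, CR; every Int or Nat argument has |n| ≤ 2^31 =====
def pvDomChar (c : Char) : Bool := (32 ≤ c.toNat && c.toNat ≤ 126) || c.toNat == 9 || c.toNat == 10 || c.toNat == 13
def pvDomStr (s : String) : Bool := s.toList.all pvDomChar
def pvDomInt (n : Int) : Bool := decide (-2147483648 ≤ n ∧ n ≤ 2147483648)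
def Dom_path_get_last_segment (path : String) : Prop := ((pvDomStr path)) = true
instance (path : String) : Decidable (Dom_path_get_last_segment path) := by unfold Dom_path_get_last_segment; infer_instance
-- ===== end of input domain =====

-- B replaces A's explicit trailing-slash scan loop plus rfind with built-in string
-- operations (rstrip + rsplit); objective: idiomatic. Same return value everywhere.

-- ===== PORT A =====
-- the 'while eidx > 0 and path[eidx] == "/": eidx -= 1' loop
def pvAwhile (s : List Char) (eidx : Int) : Int :=
  if h : 0 < eidx ∧ PySem.List.pyGet? s eidx = some '/' then pvAwhile s (eidx - 1) else eidx
termination_by eidx.toNat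
decreasing_by omega

def path_get_last_segment (path : String) : Option String :=
  if PySem.Str.isIn "/" path = false then none
  else
    let s := path.toList
    let eidx := pvAwhile s ((s.length : Int) - 1)
    let bidx := PySem.Chars.rfind (PySem.List.slice s none (some eidx)) ['/'] + 1
    some (String.ofList (PySem.List.slice s (some bidx) (some (eidx + 1))))

-- ===== PORT B =====
def path_get_last_segment_alt (path : String) : Option String :=
  if PySem.Str.isIn "/" path = false then none
  else
    -- path.rstrip("/"), exact: drop the trailing run of '/' characters
    let stripped := (path.toList.reverse.dropWhile (· == '/')).reverse
    if stripped.isEmpty then some "/"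
    else
      -- stripped.rsplit("/", 1)[-1], exact: the suffix after the last '/',
      -- or all of stripped when it has no '/'
      some (String.ofList (stripped.reverse.takeWhile (· != '/')).reverse)

-- ===== PRECONDITION & SPEC =====
def Spec_path_get_last_segment (path : String) (out : Option String) : Prop := out = path_get_last_segment_alt path
instance (path : String) (out : Option String) : Decidable (Spec_path_get_last_segment path out) := by unfold Spec_path_get_last_segment; infer_instance

-- ===== CLAIM (what is proved, stated in full; the proofs are below) =====
def Claim_equal_path_get_last_segment : Prop := ∀ (path : String), Dom_path_get_last_segment path → Spec_path_get_last_segment path (path_get_last_segment path)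

-- ===== LEMMAS AND PROOFS =====

lemma pvAwhile_step (s : List Char) (e : Int) (h : 0 < e ∧ PySem.List.pyGet? s e = some '/') :
    pvAwhile s e = pvAwhile s (e - 1) := by
  conv_lhs => rw [pvAwhile]
  rw [dif_pos h]

lemma pvAwhile_stop (s : List Char) (e : Int) (h : ¬(0 < e ∧ PySem.List.pyGet? s e = some '/')) :
    pvAwhile s e = e := by
  conv_lhs => rw [pvAwhile]
  rw [dif_neg h]

-- the while loop only reads indices ≤ eidx, so a suffix beyond them is irrelevant
lemma pvAwhile_append (xs ys : List Char) : ∀ (n : Nat) (e : Int), e.toNat = n → 0 ≤ e → e < xs.length →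
    pvAwhile (xs ++ ys) e = pvAwhile xs e := by
  intro n
  induction n with
  | zero =>
    intro e hn h0 _
    have he : e = 0 := by omega
    rw [pvAwhile_stop _ _ (by simp [he]), pvAwhile_stop _ _ (by simp [he])]
  | succ n ih =>
    intro e hn h0 hlt
    have hpos : 0 < e := by omega
    have hget : PySem.List.pyGet? (xs ++ ys) e = PySem.List.pyGet? xs e := by
      rw [PySem.List.pyGet?_of_nonneg _ h0, PySem.List.pyGet?_of_nonneg _ h0]
      rw [List.getElem?_append_left (by omega)]
    by_cases hc : PySem.List.pyGet? xs e = some '/'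
    · rw [pvAwhile_step _ _ ⟨hpos, by rw [hget]; exact hc⟩, pvAwhile_step _ _ ⟨hpos, hc⟩]
      exact ih (e - 1) (by omega) (by omega) (by omega)
    · rw [pvAwhile_stop _ _ (by rw [hget]; tauto), pvAwhile_stop _ _ (by tauto)]

-- a nonempty list not ending in '/' stops the loop at once
lemma pvAwhile_last_ne (u : List Char) (_hne : u ≠ []) (hlast : u.getLast? ≠ some '/') :
    pvAwhile u ((u.length : Int) - 1) = (u.length : Int) - 1 := by
  apply pvAwhile_stop
  rintro ⟨hpos, hget⟩
  apply hlast
  rw [PySem.List.pyGet?_of_nonneg _ (by omega)] at hget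
  have h1 : ((u.length : Int) - 1).toNat = u.length - 1 := by omega
  rw [h1] at hget
  rw [List.getLast?_eq_getElem?]
  exact hget

-- the loop lands on the last non-'/' character (index 0 when all are '/')
lemma pvAwhile_main : ∀ (k : Nat) (u : List Char), u.getLast? ≠ some '/' → (u ≠ [] ∨ k ≠ 0) →
    pvAwhile (u ++ List.replicate k '/') ((u.length : Int) + k - 1) =
      if u = [] then 0 else (u.length : Int) - 1 := by
  intro k
  induction k with
  | zero =>
    intro u hlast hne
    have hu : u ≠ [] := by tauto
    rw [if_neg hu]
    have := pvAwhile_last_ne u hu hlast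
    simpa using this
  | succ k ih =>
    intro u hlast hne
    by_cases hz : u = [] ∧ k = 0
    · obtain ⟨h1, h2⟩ := hz
      subst h1; subst h2
      rw [pvAwhile_stop _ _ (by norm_num)]
      norm_num
    · have hul : u = [] → k ≠ 0 := by tauto
      have hpos : 0 < (u.length : Int) + ((k : Int) + 1) - 1 := by
        rcases Decidable.em (u = []) with h | h
        · have := hul h
          subst h
          simp only [List.length_nil, Nat.cast_zero]
          omega
        · have : 0 < u.length := List.length_pos_iff.mpr h
          omega
      have hsplit : u ++ List.replicate (k + 1) '/' = (u ++ List.replicate k '/') ++ ['/'] := by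
        rw [List.replicate_succ' (n := k)]
        simp
      have hget : PySem.List.pyGet? (u ++ List.replicate (k + 1) '/') ((u.length : Int) + ((k : Int) + 1) - 1) = some '/' := by
        rw [hsplit]
        have hlen : ((u.length : Int) + ((k : Int) + 1) - 1) = (((u ++ List.replicate k '/').length : Nat) : Int) := by
          simp only [List.length_append, List.length_replicate]
          push_cast
          ring
        rw [hlen]
        exact PySem.List.pyGet?_append_length _ [] '/'
      have hstep := pvAwhile_step (u ++ List.replicate (k + 1) '/') ((u.length : Int) + ((k : Int) + 1) - 1) ⟨hpos, hget⟩
      have hcut : pvAwhile (u ++ List.replicate (k + 1) '/') ((u.length : Int) + ((k : Int) + 1) - 1 - 1)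
          = pvAwhile (u ++ List.replicate k '/') ((u.length : Int) + (k : Int) - 1) := by
        rw [hsplit]
        have h1 : ((u.length : Int) + ((k : Int) + 1) - 1 - 1) = (u.length : Int) + (k : Int) - 1 := by ring
        rw [h1]
        by_cases hu : u = []
        · have hk := hul hu
          subst hu
          apply pvAwhile_append _ _ ((((0 : Nat) : Int) + (k : Int) - 1)).toNat _ rfl (by simp; omega)
          simp only [List.nil_append, List.length_replicate, Nat.cast_zero]
          omega
        · have : 0 < u.length := List.length_pos_iff.mpr hu
          apply pvAwhile_append _ _ _ _ rfl (by omega)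
          simp only [List.length_append, List.length_replicate]
          push_cast
          omega
      have harg : ((u.length : Int) + (((k : Nat) + 1 : Nat) : Int) - 1) = (u.length : Int) + ((k : Int) + 1) - 1 := by push_cast; ring
      rw [harg, hstep, hcut]
      exact ih u hlast (by tauto)

-- rfind of '/' in a slash-free list is -1
lemma rfind_go_no_slash (w : List Char) (hw : '/' ∉ w) : ∀ j, PySem.Chars.rfind.go w ['/'] j = -1 := by
  intro j
  induction j with
  | zero =>
    simp only [PySem.Chars.rfind.go]
    rw [if_neg]
    intro h
    rw [List.isPrefixOf_iff_prefix] at h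
    exact hw (h.mem (by simp))
  | succ j ih =>
    simp only [PySem.Chars.rfind.go]
    rw [if_neg, ih]
    intro h
    rw [List.isPrefixOf_iff_prefix] at h
    exact hw (List.mem_of_mem_drop (h.mem (by simp)))

lemma rfind_no_slash (w : List Char) (hw : '/' ∉ w) : PySem.Chars.rfind w ['/'] = -1 := by
  unfold PySem.Chars.rfind
  exact rfind_go_no_slash w hw _

-- rfind of '/' finds the last slash
lemma rfind_go_last (v w : List Char) (hw : '/' ∉ w) :
    ∀ k, PySem.Chars.rfind.go (v ++ '/' :: w) ['/'] (v.length + k) = v.length := by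
  intro k
  induction k with
  | zero =>
    cases hv : v.length with
    | zero =>
      have hvnil : v = [] := List.length_eq_zero_iff.mp hv
      subst hvnil
      simp [PySem.Chars.rfind.go, List.isPrefixOf]
    | succ n =>
      simp only [PySem.Chars.rfind.go]
      rw [if_pos]
      · rw [List.isPrefixOf_iff_prefix, ← hv, List.drop_append_of_le_length (by omega),
          List.drop_length]
        exact ⟨w, rfl⟩
  | succ k ih =>
    have harr : v.length + (k + 1) = (v.length + k) + 1 := by omega
    rw [harr]
    simp only [PySem.Chars.rfind.go]
    rw [if_neg, ih]
    intro h
    rw [List.isPrefixOf_iff_prefix] at h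
    have hdrop : (v ++ '/' :: w).drop (v.length + k + 1) = w.drop k := by
      rw [show v.length + k + 1 = v.length + (k + 1) by omega, List.drop_append]
      rw [List.drop_eq_nil_of_le (by omega), Nat.add_sub_cancel_left, List.drop_succ_cons,
        List.nil_append]
    rw [hdrop] at h
    exact hw (List.mem_of_mem_drop (h.mem (by simp)))

lemma rfind_last (v w : List Char) (hw : '/' ∉ w) :
    PySem.Chars.rfind (v ++ '/' :: w) ['/'] = v.length := by
  unfold PySem.Chars.rfind
  have hlen : (v ++ '/' :: w).length = v.length + (w.length + 1) := by
    simp only [List.length_append, List.length_cons]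
  rw [hlen]
  exact rfind_go_last v w hw _

-- trailing-slash decomposition of the input
lemma decomp_trailing (cs : List Char) : ∃ u k, cs = u ++ List.replicate k '/' ∧
    u.getLast? ≠ some '/' ∧ (cs.reverse.dropWhile (· == '/')).reverse = u := by
  refine ⟨(cs.reverse.dropWhile (· == '/')).reverse, (cs.reverse.takeWhile (· == '/')).length, ?_, ?_, rfl⟩
  · have htk : cs.reverse.takeWhile (· == '/') = List.replicate (cs.reverse.takeWhile (· == '/')).length '/' := by
      rw [List.eq_replicate_iff]
      refine ⟨rfl, fun b hb => ?_⟩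
      have := List.mem_takeWhile_imp hb
      simpa using this
    conv_lhs => rw [← List.reverse_reverse cs, ← List.takeWhile_append_dropWhile (p := (· == '/')) (l := cs.reverse)]
    rw [List.reverse_append]
    congr 1
    conv_lhs => rw [htk]
    rw [List.reverse_replicate]
  · rw [List.getLast?_reverse]
    cases hd : cs.reverse.dropWhile (· == '/') with
    | nil => simp
    | cons a t =>
      have ha := List.head_dropWhile_not (· == '/') (l := cs.reverse) (by rw [hd]; simp)
      simp only [hd, List.head_cons] at ha
      simp only [List.head?_cons, ne_eq, Option.some.injEq]
      intro h
      rw [h] at ha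
      simp at ha

-- last-segment decomposition of the stripped part
lemma decomp_front (u : List Char) (_hne : u ≠ []) (hlast : u.getLast? ≠ some '/') :
    ('/' ∉ u ∧ (u.reverse.takeWhile (· != '/')).reverse = u) ∨
    ∃ v w, u = v ++ '/' :: w ∧ '/' ∉ w ∧ w ≠ [] ∧ (u.reverse.takeWhile (· != '/')).reverse = w := by
  have hw : '/' ∉ u.reverse.takeWhile (· != '/') := by
    intro h
    have := List.mem_takeWhile_imp h
    simp at this
  cases hd : u.reverse.dropWhile (· != '/') with
  | nil =>
    left
    have hrev : u.reverse = u.reverse.takeWhile (· != '/') := by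
      conv_lhs => rw [← List.takeWhile_append_dropWhile (p := (· != '/')) (l := u.reverse)]
      rw [hd, List.append_nil]
    constructor
    · intro h
      exact hw (by rw [← hrev]; simpa using h)
    · rw [← hrev, List.reverse_reverse]
  | cons a t =>
    right
    have ha := List.head_dropWhile_not (· != '/') (l := u.reverse) (by rw [hd]; simp)
    simp only [hd, List.head_cons, bne_eq_false_iff_eq] at ha
    subst ha
    have hrev : u.reverse = u.reverse.takeWhile (· != '/') ++ '/' :: t := by
      conv_lhs => rw [← List.takeWhile_append_dropWhile (p := (· != '/')) (l := u.reverse)]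
      rw [hd]
    have hu : u = t.reverse ++ '/' :: (u.reverse.takeWhile (· != '/')).reverse := by
      conv_lhs => rw [← List.reverse_reverse u, hrev]
      simp
    refine ⟨t.reverse, (u.reverse.takeWhile (· != '/')).reverse, hu, by simpa using hw, ?_, rfl⟩
    intro hwnil
    apply hlast
    rw [hu, hwnil]
    simp

-- ===== VERDICT (by name: the statement is the Claim_ definition above) =====
theorem path_get_last_segment_spec : Claim_equal_path_get_last_segment := by
  intro path _
  unfold Spec_path_get_last_segment path_get_last_segment path_get_last_segment_alt
  by_cases hin : PySem.Str.isIn "/" path = false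
  · rw [if_pos hin, if_pos hin]
  · rw [if_neg hin, if_neg hin]
    dsimp only
    have hmem : '/' ∈ path.toList := by
      have hi : ("/" : String).toList <:+: path.toList :=
        (PySem.Str.isIn_iff_infix _ _).mp (by revert hin; cases PySem.Str.isIn "/" path <;> simp)
      exact hi.subset (by decide)
    have hcsne : path.toList ≠ [] := List.ne_nil_of_mem hmem
    obtain ⟨u, k, hdec, hlast, hstr⟩ := decomp_trailing path.toList
    rw [hstr]
    have hne' : u ≠ [] ∨ k ≠ 0 := by
      by_contra hcon
      rw [not_or, not_not, not_not] at hcon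
      exact hcsne (by rw [hdec, hcon.1, hcon.2]; simp)
    have hEk : pvAwhile path.toList ((path.toList.length : Int) - 1) =
        if u = [] then 0 else (u.length : Int) - 1 := by
      rw [hdec]
      rw [show (((u ++ List.replicate k '/').length : Int) - 1) = ((u.length : Int) + (k : Int) - 1) by
        push_cast [List.length_append, List.length_replicate]; ring]
      exact pvAwhile_main k u hlast hne'
    rw [hEk]
    by_cases hu : u = []
    · rw [if_pos hu]
      have hk : k ≠ 0 := by tauto
      rw [hu] at hdec hstr ⊢
      rw [PySem.List.slice_to _ (by norm_num), show (0 : Int).toNat = 0 from rfl, List.take_zero]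
      rw [rfind_no_slash [] (by simp)]
      rw [show (-1 : Int) + 1 = 0 by ring, show (0 : Int) + 1 = 1 by ring]
      rw [PySem.List.slice_zero_start, PySem.List.slice_to _ (by norm_num),
        show (1 : Int).toNat = 1 from rfl]
      have htake : path.toList.take 1 = ['/'] := by
        rw [hdec]
        cases k with
        | zero => exact (hk rfl).elim
        | succ n => simp [List.replicate_succ]
      rw [htake]
      rfl
    · rw [if_neg hu]
      have hupos : 0 < u.length := List.length_pos_iff.mpr hu
      have hinner : PySem.List.slice path.toList none (some ((u.length : Int) - 1)) = u.dropLast := by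
        rw [PySem.List.slice_to _ (by omega),
          show ((u.length : Int) - 1).toNat = u.length - 1 by omega,
          hdec, List.take_append_of_le_length (by omega), ← List.dropLast_eq_take]
      rw [hinner]
      have hsimpl : (u.length : Int) - 1 + 1 = (u.length : Int) := by ring
      rw [hsimpl]
      have hisem : u.isEmpty = false := by simp [hu]
      rw [hisem]
      simp only [Bool.false_eq_true, if_false]
      rcases decomp_front u hu hlast with ⟨hnoslash, hself⟩ | ⟨v, w, huvw, hwno, hwne, htkw⟩
      · rw [hself]
        rw [rfind_no_slash _ (fun h => hnoslash ((List.dropLast_sublist (l := u)).subset h))]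
        rw [show (-1 : Int) + 1 = 0 by ring]
        rw [PySem.List.slice_zero_start, PySem.List.slice_to _ (by positivity), Int.toNat_natCast]
        rw [hdec, List.take_left]
      · rw [htkw]
        have hdl : u.dropLast = v ++ '/' :: w.dropLast := by
          rw [huvw, List.dropLast_append_of_ne_nil (by simp), List.dropLast_cons_of_ne_nil hwne]
        rw [hdl, rfind_last v _ (fun h => hwno ((List.dropLast_sublist (l := w)).subset h))]
        rw [PySem.List.slice_toNat _ (by positivity) (by positivity)]
        rw [show ((v.length : Int) + 1).toNat = v.length + 1 by omega, Int.toNat_natCast]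
        have hlenu : u.length = v.length + 1 + w.length := by rw [huvw]; simp; omega
        have hcs2 : path.toList = (v ++ ['/']) ++ (w ++ List.replicate k '/') := by
          rw [hdec, huvw]; simp
        rw [hcs2, List.drop_left' (by simp), show u.length - (v.length + 1) = w.length by omega,
          List.take_left]
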